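-- pv_equiv track=rewrite | github.com/MICHAEL961205/Graphite | graphite/solvers/hybrid_genetic_solver.py | _build_edge_map
-- ===== SOURCE A (Python) =====
-- from typing import List, Union, Tuple
--
-- def _build_edge_map(tour: List[int]) -> dict:
--     """Build edge map for a tour"""
--     n = len(tour)
--     edge_map = {}
--
--     for i in range(n):
--         city = tour[i]
--         prev_city = tour[i - 1]
--         next_city = tour[(i + 1) % n]
--
--         if city not in edge_map:
--             edge_map[city] = set()
--         edge_map[city].add(prev_city)
--         edge_map[city].add(next_city)
--
--     return edge_map
-- ===== SOURCE B (Python) =====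
-- def _build_edge_map(tour):
--     """Build edge map for a tour (group-by-city decomposition)."""
--     n = len(tour)
--     occ = {}
--     for i, c in enumerate(tour):
--         occ.setdefault(c, []).append(i)
--     return {c: {x for i in idxs for x in (tour[i - 1], tour[(i + 1) % n])}
--             for c, idxs in occ.items()}
-- ===== Notes on version B (the rewrite author's own statement) =====
-- stated objective: alternative
-- what changed: Replaces A's single vertex-centric loop that mutates per-city sets in a dict with a two-phase group-by decomposition: one pass collects each city's occurrence indices into a dict, then a dict comprehension turns each city's index list into its neighbor set.
import Mathlib
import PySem

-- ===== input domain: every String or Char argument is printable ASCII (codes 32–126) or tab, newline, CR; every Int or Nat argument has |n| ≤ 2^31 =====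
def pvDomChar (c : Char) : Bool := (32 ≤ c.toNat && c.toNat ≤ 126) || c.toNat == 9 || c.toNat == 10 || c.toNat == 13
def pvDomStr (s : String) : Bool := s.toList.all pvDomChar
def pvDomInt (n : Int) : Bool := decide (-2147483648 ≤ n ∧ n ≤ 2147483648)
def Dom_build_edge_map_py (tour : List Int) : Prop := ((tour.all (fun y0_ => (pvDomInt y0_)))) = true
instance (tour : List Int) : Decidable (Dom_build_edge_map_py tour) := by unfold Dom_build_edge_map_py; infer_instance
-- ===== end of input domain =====

-- B replaces A's vertex-centric set-mutating loop by a group-by decomposition (collect occurrence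
-- indices per city, then map each index list to its neighbor set); same O(n) cost, alternative structure.

-- ===== PORT A =====
-- one iteration of A's loop body (i is the loop index from range(n))
def buildEdgeStepA (tour : List Int) (n : Int) (d : PySem.Dict Int (PySem.Set Int)) (i : Int) :
    PySem.Dict Int (PySem.Set Int) :=
  let city := PySem.List.pyGetD tour i 0
  let prev_city := PySem.List.pyGetD tour (i - 1) 0
  let next_city := PySem.List.pyGetD tour (PySem.Int.mod (i + 1) n) 0
  let d1 := if d.contains city then d else d.insert city PySem.Set.empty
  let d2 := d1.modify city PySem.Set.empty (fun s => PySem.Set.add s prev_city)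
  d2.modify city PySem.Set.empty (fun s => PySem.Set.add s next_city)

def build_edge_map_py (tour : List Int) : List (Int × List Int) :=
  let n : Int := tour.length
  ((PySem.List.pyRange 0 n 1).foldl (buildEdgeStepA tour n) PySem.Dict.empty).items

-- ===== PORT B =====
def build_edge_map_py_alt (tour : List Int) : List (Int × List Int) :=
  let n : Int := tour.length
  -- occ: city -> list of its occurrence indices, in first-occurrence order
  let occ := (PySem.List.enumerate tour).foldl
      (fun d p => d.modify p.2 [] (fun l => l ++ [p.1])) PySem.Dict.empty
  occ.items.map (fun ci =>
    (ci.1, ci.2.foldl (fun s i =>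
        PySem.Set.add (PySem.Set.add s (PySem.List.pyGetD tour (i - 1) 0))
          (PySem.List.pyGetD tour (PySem.Int.mod (i + 1) n) 0)) PySem.Set.empty))

-- ===== PRECONDITION & SPEC =====
def Spec_build_edge_map_py (tour : List Int) (out : List (Int × List Int)) : Prop := out = build_edge_map_py_alt tour
instance (tour : List Int) (out : List (Int × List Int)) : Decidable (Spec_build_edge_map_py tour out) := by unfold Spec_build_edge_map_py; infer_instance

-- ===== CLAIM (what is proved, stated in full; the proofs are below) =====
def Claim_equal_build_edge_map_py : Prop := ∀ (tour : List Int), Dom_build_edge_map_py tour → Spec_build_edge_map_py tour (build_edge_map_py tour)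

-- ===== LEMMAS AND PROOFS =====

-- the per-city accumulation step, over pairs (index, value) of enumerate(tour)
def innerStep (tour : List Int) (n : Int) (c : Int) (s : PySem.Set Int) (p : Int × Int) :
    PySem.Set Int :=
  if p.2 = c then
    PySem.Set.add (PySem.Set.add s (PySem.List.pyGetD tour (p.1 - 1) 0))
      (PySem.List.pyGetD tour (PySem.Int.mod (p.1 + 1) n) 0)
  else s

theorem keys_stepA (tour : List Int) (n i : Int) (d : PySem.Dict Int (PySem.Set Int)) :
    (buildEdgeStepA tour n d i).keys = PySem.Set.add d.keys (PySem.List.pyGetD tour i 0) := by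
  simp only [buildEdgeStepA]
  set city := PySem.List.pyGetD tour i 0 with hcity
  by_cases hc : d.contains city = true
  · have h1 : (d.modify city PySem.Set.empty (fun s => PySem.Set.add s (PySem.List.pyGetD tour (i - 1) 0))).keys = d.keys := by
      rw [PySem.Dict.keys_modify, PySem.Dict.keys_insert_of_contains _ _ hc]
    have h2 : (d.modify city PySem.Set.empty (fun s => PySem.Set.add s (PySem.List.pyGetD tour (i - 1) 0))).contains city = true := by
      rw [PySem.Dict.contains_modify]; simp
    rw [if_pos hc, PySem.Dict.keys_modify, PySem.Dict.keys_insert_of_contains _ _ h2, h1,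
      PySem.Set.add_of_mem ((PySem.Dict.contains_iff_mem_keys d city).mp hc)]
  · have hc' : d.contains city = false := by simpa using hc
    have hins : (d.insert city PySem.Set.empty).contains city = true :=
      PySem.Dict.contains_insert_self d city _
    have h1 : ((d.insert city PySem.Set.empty).modify city PySem.Set.empty (fun s => PySem.Set.add s (PySem.List.pyGetD tour (i - 1) 0))).keys = (d.insert city PySem.Set.empty).keys := by
      rw [PySem.Dict.keys_modify, PySem.Dict.keys_insert_of_contains _ _ hins]
    have h2 : ((d.insert city PySem.Set.empty).modify city PySem.Set.empty (fun s => PySem.Set.add s (PySem.List.pyGetD tour (i - 1) 0))).contains city = true := by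
      rw [PySem.Dict.contains_modify]; simp
    rw [if_neg hc, PySem.Dict.keys_modify, PySem.Dict.keys_insert_of_contains _ _ h2, h1,
      PySem.Dict.keys_insert_of_not_contains _ _ hc',
      PySem.Set.add_of_not_mem (fun hm => hc ((PySem.Dict.contains_iff_mem_keys d city).mpr hm))]

theorem getD_stepA (tour : List Int) (n i : Int) (d : PySem.Dict Int (PySem.Set Int)) (c : Int) :
    (buildEdgeStepA tour n d i).getD c PySem.Set.empty =
      if c = PySem.List.pyGetD tour i 0 then
        PySem.Set.add (PySem.Set.add (d.getD c PySem.Set.empty) (PySem.List.pyGetD tour (i - 1) 0))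
          (PySem.List.pyGetD tour (PySem.Int.mod (i + 1) n) 0)
      else d.getD c PySem.Set.empty := by
  simp only [buildEdgeStepA]
  set city := PySem.List.pyGetD tour i 0 with hcity
  set d1 := (if d.contains city = true then d else d.insert city PySem.Set.empty) with hd1def
  have hd1 : ∀ x, d1.getD x PySem.Set.empty = d.getD x PySem.Set.empty := by
    intro x
    by_cases hc : d.contains city = true
    · rw [hd1def, if_pos hc]
    · have hc' : d.contains city = false := by simpa using hc
      rw [hd1def, if_neg hc, PySem.Dict.getD_insert]
      by_cases hxc : x = city
      · subst hxc; rw [if_pos rfl, PySem.Dict.getD_of_not_contains _ _ hc']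
      · rw [if_neg hxc]
  by_cases hcc : c = city
  · subst hcc
    rw [PySem.Dict.getD_modify_self, PySem.Dict.getD_modify_self, hd1, if_pos rfl]
  · rw [PySem.Dict.getD_modify_of_ne _ _ _ hcc, PySem.Dict.getD_modify_of_ne _ _ _ hcc, hd1,
      if_neg hcc]

theorem loopA_char (tour : List Int) (k : Nat) (hk : k ≤ tour.length) :
    ((PySem.List.pyRange 0 (k : Int) 1).foldl (buildEdgeStepA tour (tour.length : Int)) PySem.Dict.empty).keys
        = PySem.Set.ofList (tour.take k) ∧
    ((PySem.List.pyRange 0 (k : Int) 1).foldl (buildEdgeStepA tour (tour.length : Int)) PySem.Dict.empty).keys.Nodup ∧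
    ∀ c, ((PySem.List.pyRange 0 (k : Int) 1).foldl (buildEdgeStepA tour (tour.length : Int)) PySem.Dict.empty).getD c PySem.Set.empty
        = (PySem.List.enumerate (tour.take k)).foldl (innerStep tour (tour.length : Int) c) PySem.Set.empty := by
  induction k with
  | zero =>
    simp [PySem.Dict.keys_empty, PySem.Set.ofList_nil,
      PySem.List.enumerate_nil, PySem.Dict.getD_empty]
  | succ k ih =>
    have hk' : k ≤ tour.length := Nat.le_of_succ_le hk
    have hklt : k < tour.length := hk
    obtain ⟨hkeys, hnd, hget⟩ := ih hk'
    have hrange : PySem.List.pyRange 0 ((k + 1 : Nat) : Int) 1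
        = PySem.List.pyRange 0 (k : Int) 1 ++ [(k : Int)] := by
      push_cast
      exact PySem.List.pyRange_one_succ_right (by positivity)
    have hcity : PySem.List.pyGetD tour (k : Int) 0 = tour[k] := by
      rw [PySem.List.pyGetD_eq_getElem tour 0 (by positivity) (by exact_mod_cast hklt)]
      simp
    have htake : tour.take (k + 1) = tour.take k ++ [tour[k]] := by
      rw [List.take_add_one]; simp [List.getElem?_eq_getElem hklt]
    have hlen : (tour.take k).length = k := List.length_take_of_le hk'
    have henum : PySem.List.enumerate (tour.take (k + 1))
        = PySem.List.enumerate (tour.take k) ++ [((k : Int), tour[k])] := by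
      rw [htake, PySem.List.enumerate_append]
      simp [PySem.List.enumerate_cons, PySem.List.enumerate_nil, hlen]
    set D := (PySem.List.pyRange 0 (k : Int) 1).foldl (buildEdgeStepA tour (tour.length : Int)) PySem.Dict.empty with hD
    have hfold : (PySem.List.pyRange 0 ((k + 1 : Nat) : Int) 1).foldl
        (buildEdgeStepA tour (tour.length : Int)) PySem.Dict.empty
        = buildEdgeStepA tour (tour.length : Int) D (k : Int) := by
      rw [hrange, List.foldl_append]
      simp only [List.foldl_cons, List.foldl_nil]
      rfl
    refine ⟨?_, ?_, ?_⟩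
    · rw [hfold, keys_stepA, hkeys, hcity, htake, PySem.Set.ofList_append_singleton]
    · rw [hfold, keys_stepA]
      exact PySem.Set.nodup_add _ _ hnd
    · intro c
      rw [hfold, getD_stepA, hget c, henum, List.foldl_append]
      simp only [List.foldl_cons, List.foldl_nil, innerStep, hcity]
      by_cases hcc : c = tour[k]
      · rw [if_pos hcc, if_pos hcc.symm]
      · rw [if_neg hcc, if_neg (fun h => hcc h.symm)]

theorem portA_char (tour : List Int) :
    build_edge_map_py tour = (PySem.Set.ofList tour).map (fun c =>
      (c, (PySem.List.enumerate tour).foldl (innerStep tour (tour.length : Int) c) PySem.Set.empty)) := by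
  obtain ⟨hkeys, hnd, hget⟩ := loopA_char tour tour.length le_rfl
  simp only [List.take_length] at hkeys hget
  simp only [build_edge_map_py]
  rw [PySem.Dict.items_eq_map_keys _ hnd PySem.Set.empty]
  rw [hkeys]
  exact List.map_congr_left (fun c _ => by rw [hget c])

theorem portB_char (tour : List Int) :
    build_edge_map_py_alt tour = (PySem.Set.ofList tour).map (fun c =>
      (c, (PySem.List.enumerate tour).foldl (innerStep tour (tour.length : Int) c) PySem.Set.empty)) := by
  simp only [build_edge_map_py_alt]
  set n : Int := (tour.length : Int) with hn
  set e := PySem.List.enumerate tour with he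
  have hswap : e.foldl (fun d p => d.modify p.2 [] (fun l => l ++ [p.1])) PySem.Dict.empty
      = (e.map (fun p => (p.2, p.1))).foldl (fun d p => d.modify p.1 [] (fun l => l ++ [p.2])) PySem.Dict.empty := by
    rw [List.foldl_map]
  have hkeys : (e.foldl (fun d p => d.modify p.2 [] (fun l => l ++ [p.1])) PySem.Dict.empty).keys
      = PySem.Set.ofList tour := by
    rw [PySem.Dict.keys_foldl_modify_key e (fun p => p.2) [] (fun _ p => fun l => l ++ [p.1]) PySem.Dict.empty]
    rw [PySem.Dict.keys_empty, PySem.Set.update_nil_left, he, PySem.List.map_snd_enumerate]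
  have hnd : (e.foldl (fun d p => d.modify p.2 [] (fun l => l ++ [p.1])) PySem.Dict.empty).keys.Nodup := by
    apply PySem.Dict.nodup_keys_foldl_modify_key e (fun p => p.2) [] (fun _ p => fun l => l ++ [p.1])
    simp [PySem.Dict.keys_empty]
  have hgetD : ∀ c, (e.foldl (fun d p => d.modify p.2 [] (fun l => l ++ [p.1])) PySem.Dict.empty).getD c []
      = (e.filter (fun p => p.2 == c)).map (fun p => p.1) := by
    intro c
    rw [hswap, PySem.Dict.getD_foldl_modify_append]
    simp [List.filter_map, Function.comp_def]
  rw [PySem.Dict.items_eq_map_keys _ hnd []]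
  rw [hkeys, List.map_map]
  refine List.map_congr_left (fun c _ => ?_)
  simp only [Function.comp_apply]
  rw [hgetD c]
  congr 1
  rw [List.foldl_map, List.foldl_filter]
  apply PySem.List.foldl_congr_mem
  intro s p _
  by_cases hcc : p.2 = c <;> simp [innerStep, hcc]

-- ===== VERDICT (by name: the statement is the Claim_ definition above) =====
theorem build_edge_map_py_spec : Claim_equal_build_edge_map_py := by
  intro tour _
  unfold Spec_build_edge_map_py
  rw [portA_char, portB_char]
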